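-- pv_equiv track=rewrite | github.com/m01ali/Docs-Conversions-Via-LLMs | doc_to_markdown.py | _extract_tables_from_text
-- ===== SOURCE A (Python) =====
-- def _extract_tables_from_text(text):
--     """Extract table-like structures from text"""
--     # This is a simplified approach - in a real implementation,
--     # we would use more sophisticated pattern recognition
--     tables = []
--     lines = text.split('\n')
--     current_table = []
--
--     for line in lines:
--         if '|' in line or '+--' in line or line.count('\t') >= 3:
--             current_table.append(line)
--         elif current_table:
--             if len(current_table) >= 2:  # Minimum size for a table
--                 tables.append('\n'.join(current_table))
--             current_table = []
--
--     if current_table and len(current_table) >= 2: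
--         tables.append('\n'.join(current_table))
--
--     return tables
-- ===== SOURCE B (Python) =====
-- def _extract_tables_from_text(text):
--     """Extract table-like structures from text"""
--     def tableish(line):
--         return '|' in line or '+--' in line or line.count('\t') >= 3
--
--     # Two-pointer scan: locate the boundaries [i, k) of each maximal run of
--     # table-like lines and slice it out; no running accumulator, no flush sites.
--     lines = text.split('\n')
--     n = len(lines)
--     out = []
--     i = 0
--     while i < n:
--         if not tableish(lines[i]):
--             i += 1
--             continue
--         k = i + 1
--         while k < n and tableish(lines[k]):
--             k += 1
--         if k - i >= 2:
--             out.append('\n'.join(lines[i:k]))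
--         i = k
--     return out
-- ===== Notes on version B (the rewrite author's own statement) =====
-- stated objective: alternative
-- what changed: Replaces A's line-by-line current_table accumulator with its two flush sites by a two-pointer scan that finds each maximal table-like run's boundary indices and slices it out of the line list.
import Mathlib
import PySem

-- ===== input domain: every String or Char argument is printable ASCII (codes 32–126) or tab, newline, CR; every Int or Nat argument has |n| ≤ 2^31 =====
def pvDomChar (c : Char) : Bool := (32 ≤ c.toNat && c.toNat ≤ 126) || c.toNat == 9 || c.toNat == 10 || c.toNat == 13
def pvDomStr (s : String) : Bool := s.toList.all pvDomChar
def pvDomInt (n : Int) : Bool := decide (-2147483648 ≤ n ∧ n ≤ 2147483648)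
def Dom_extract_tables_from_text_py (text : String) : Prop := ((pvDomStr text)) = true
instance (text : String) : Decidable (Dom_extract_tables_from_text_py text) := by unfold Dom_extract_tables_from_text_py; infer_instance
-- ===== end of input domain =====

-- B replaces A's line-by-line accumulator/flush loop by a two-pointer scan over run
-- boundary indices that slices each maximal table-like run out of the line list.

-- shared predicate: '|' in line or '+--' in line or line.count('\t') >= 3 (identical in both sources)
def pvTableish (line : String) : Bool :=
  PySem.Str.isIn "|" line || PySem.Str.isIn "+--" line || decide (3 ≤ PySem.Str.count line "\t")

-- ===== PORT A =====
-- state = (tables, current_table); split? is exact here: the separator "\n" is nonempty, so split? never returns none and .getD [] is never taken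
def pvStepA (st : List String × List String) (line : String) : List String × List String :=
  if pvTableish line then (st.1, st.2 ++ [line])
  else if st.2 ≠ [] then
    (if 2 ≤ st.2.length then st.1 ++ [PySem.Str.join "\n" st.2] else st.1, [])
  else st

def extract_tables_from_text_py (text : String) : List String :=
  let st := (((PySem.Str.split? text "\n").getD [])).foldl pvStepA ([], [])
  if st.2 ≠ [] ∧ 2 ≤ st.2.length then st.1 ++ [PySem.Str.join "\n" st.2] else st.1

-- ===== PORT B =====
-- inner while loop: advance k while k < n and lines[k] is table-like
-- (lines[k] with 0 ≤ k is pyGetD; inside the loop k < n = len(lines), so the default is never taken)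
def pvRunEnd (lines : List String) (n k : Nat) : Nat :=
  if k < n ∧ pvTableish (PySem.List.pyGetD lines (k : Int) "") then pvRunEnd lines n (k+1) else k
termination_by n - k

lemma pvRunEnd_ge (lines : List String) (n k : Nat) : k ≤ pvRunEnd lines n k := by
  unfold pvRunEnd
  split
  · have := pvRunEnd_ge lines n (k+1); omega
  · omega
termination_by n - k

-- outer while loop over the index i, with the output list as the only accumulator
def pvLoop (lines : List String) (n i : Nat) (out : List String) : List String :=
  if i < n then
    if ¬ pvTableish (PySem.List.pyGetD lines (i : Int) "") then pvLoop lines n (i+1) out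
    else
      let k := pvRunEnd lines n (i+1)
      pvLoop lines n k
        (out ++ if 2 ≤ k - i then
            [PySem.Str.join "\n" (PySem.List.slice lines (some (i : Int)) (some (k : Int)))]
          else [])
  else out
termination_by n - i
decreasing_by
  · omega
  · have := pvRunEnd_ge lines n (i+1); omega

def extract_tables_from_text_py_alt (text : String) : List String :=
  let lines := (PySem.Str.split? text "\n").getD []
  pvLoop lines lines.length 0 []

-- ===== PRECONDITION & SPEC =====
def Spec_extract_tables_from_text_py (text : String) (out : List String) : Prop := out = extract_tables_from_text_py_alt text
instance (text : String) (out : List String) : Decidable (Spec_extract_tables_from_text_py text out) := by unfold Spec_extract_tables_from_text_py; infer_instance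

-- ===== CLAIM (what is proved, stated in full; the proofs are below) =====
def Claim_equal_extract_tables_from_text_py : Prop := ∀ (text : String), Dom_extract_tables_from_text_py text → Spec_extract_tables_from_text_py text (extract_tables_from_text_py text)

-- ===== LEMMAS AND PROOFS =====

-- common specification: the maximal runs of table-like lines, as a split of the line list
def pvSplit : List String → List (List String)
  | [] => [[]]
  | l :: ls => if pvTableish l then (pvSplit ls).modifyHead (l :: ·) else [] :: pvSplit ls

def pvOut (runs : List (List String)) : List String :=
  (runs.filter (fun r => 2 ≤ r.length)).map (PySem.Str.join "\n")

def pvRunLen : List String → Nat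
  | [] => 0
  | l :: ls => if pvTableish l then pvRunLen ls + 1 else 0

lemma pvOut_cons (r : List String) (rs : List (List String)) :
    pvOut (r :: rs) = (if 2 ≤ r.length then [PySem.Str.join "\n" r] else []) ++ pvOut rs := by
  by_cases h : 2 ≤ r.length <;> simp [pvOut, h]

lemma pvSplit_ne_nil (ls : List String) : pvSplit ls ≠ [] := by
  induction ls with
  | nil => simp [pvSplit]
  | cons l ls ih =>
    simp only [pvSplit]
    split
    · cases h : pvSplit ls with
      | nil => exact absurd h ih
      | cons a t => simp
    · simp

-- A's loop computes pvOut of the split, with the pending current_table prepended to the first run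
lemma pvLoopA_eq (lines tables cur : List String) :
    (let st := lines.foldl pvStepA (tables, cur)
     if st.2 ≠ [] ∧ 2 ≤ st.2.length then st.1 ++ [PySem.Str.join "\n" st.2] else st.1)
      = tables ++ pvOut ((pvSplit lines).modifyHead (cur ++ ·)) := by
  induction lines generalizing tables cur with
  | nil =>
    simp only [List.foldl_nil, pvSplit, List.modifyHead, pvOut_cons]
    by_cases h2 : 2 ≤ cur.length
    · have hne : cur ≠ [] := by cases cur <;> simp_all
      simp [h2, hne, pvOut]
    · simp [h2, pvOut]
  | cons l ls ih =>
    simp only [List.foldl_cons]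
    by_cases ht : pvTableish l
    · have hA : pvStepA (tables, cur) l = (tables, cur ++ [l]) := by simp [pvStepA, ht]
      rw [hA]
      have : (pvSplit (l :: ls)).modifyHead (cur ++ ·)
          = (pvSplit ls).modifyHead ((cur ++ [l]) ++ ·) := by
        simp only [pvSplit, ht, if_pos]
        obtain ⟨r, rs, hr⟩ : ∃ r rs, pvSplit ls = r :: rs := by
          cases h : pvSplit ls with
          | nil => exact absurd h (pvSplit_ne_nil ls)
          | cons r rs => exact ⟨r, rs, rfl⟩
        simp [hr]
      rw [this]; exact ih tables (cur ++ [l])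
    · have hsp : (pvSplit (l :: ls)).modifyHead (cur ++ ·) = cur :: pvSplit ls := by
        simp [pvSplit, ht]
      rw [hsp, pvOut_cons]
      by_cases hc : cur = []
      · have hA : pvStepA (tables, cur) l = (tables, cur) := by simp [pvStepA, ht, hc]
        rw [hA, hc]
        have h0 : (pvSplit ls).modifyHead (([] : List String) ++ ·) = pvSplit ls := by
          cases pvSplit ls <;> rfl
        have := ih tables ([] : List String)
        rw [h0] at this
        simpa using this
      · have hA : pvStepA (tables, cur) l =
            (if 2 ≤ cur.length then tables ++ [PySem.Str.join "\n" cur] else tables, []) := by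
          simp [pvStepA, ht, hc]
        rw [hA]
        have := ih (if 2 ≤ cur.length then tables ++ [PySem.Str.join "\n" cur] else tables)
          ([] : List String)
        have h0 : (pvSplit ls).modifyHead (([] : List String) ++ ·) = pvSplit ls := by
          cases pvSplit ls <;> simp
        rw [h0] at this
        rw [this]
        by_cases h2 : 2 ≤ cur.length <;> simp [h2]

lemma pvRunLen_le (ls : List String) : pvRunLen ls ≤ ls.length := by
  induction ls with
  | nil => simp [pvRunLen]
  | cons a l ih =>
    by_cases hta : pvTableish a
    · simp only [pvRunLen, hta, if_pos, List.length_cons]; omega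
    · simp [pvRunLen, hta]

-- the split decomposes at the leading run
lemma pvSplit_decomp (ls : List String) :
    pvSplit ls = ls.take (pvRunLen ls) :: (pvSplit (ls.drop (pvRunLen ls))).tail := by
  induction ls with
  | nil => simp [pvSplit, pvRunLen]
  | cons l ls ih =>
    by_cases ht : pvTableish l
    · simp only [pvSplit, pvRunLen, ht, if_pos]
      rw [ih]
      simp
    · simp [pvSplit, pvRunLen, ht]

-- after dropping the leading run, the head line (if any) is not table-like
lemma pvDrop_runLen_head (ls : List String) (x : String) (r : List String)
    (h : ls.drop (pvRunLen ls) = x :: r) : pvTableish x = false := by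
  induction ls generalizing x r with
  | nil => simp [pvRunLen] at h
  | cons l ls ih =>
    by_cases ht : pvTableish l
    · simp only [pvRunLen, ht, if_pos, List.drop_succ_cons] at h
      exact ih x r h
    · simp only [pvRunLen, ht, if_neg, Bool.false_eq_true, not_false_iff, List.drop_zero] at h
      cases h; simpa using ht

lemma pvOut_split_tail (t : List String)
    (h : t = [] ∨ ∃ x r, t = x :: r ∧ pvTableish x = false) :
    pvOut ((pvSplit t).tail) = pvOut (pvSplit t) := by
  rcases h with h | ⟨x, r, rfl, hx⟩
  · subst h; simp [pvSplit, pvOut]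
  · simp [pvSplit, hx, pvOut_cons]

lemma pvRunEnd_eq (lines : List String) (k : Nat) (hk : k ≤ lines.length) :
    pvRunEnd lines lines.length k = k + pvRunLen (lines.drop k) := by
  unfold pvRunEnd
  by_cases h : k < lines.length
  · have hd : lines.drop k = lines[k] :: lines.drop (k+1) := List.drop_eq_getElem_cons h
    have hget : PySem.List.pyGetD lines (k : Int) "" = lines[k] := by
      simp [PySem.List.pyGetD_natCast, List.getD_eq_getElem?_getD, List.getElem?_eq_getElem h]
    by_cases ht : pvTableish lines[k]
    · rw [if_pos ⟨h, by rw [hget]; exact ht⟩, pvRunEnd_eq lines (k+1) (by omega), hd]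
      simp [pvRunLen, ht]
      omega
    · rw [if_neg (by rw [hget]; tauto), hd]
      simp [pvRunLen, ht]
  · have : k = lines.length := by omega
    rw [if_neg (by omega)]
    simp [this, pvRunLen]
termination_by lines.length - k

-- B's outer loop computes pvOut of the split of the remaining suffix
lemma pvLoopB_eq (lines : List String) (i : Nat) (out : List String) (hi : i ≤ lines.length) :
    pvLoop lines lines.length i out = out ++ pvOut (pvSplit (lines.drop i)) := by
  unfold pvLoop
  by_cases h : i < lines.length
  · have hd : lines.drop i = lines[i] :: lines.drop (i+1) := List.drop_eq_getElem_cons h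
    have hget : PySem.List.pyGetD lines (i : Int) "" = lines[i] := by
      simp [PySem.List.pyGetD_natCast, List.getD_eq_getElem?_getD, List.getElem?_eq_getElem h]
    rw [if_pos h, hget]
    by_cases ht : pvTableish lines[i]
    · rw [if_neg (by simp [ht])]
      have hk := pvRunEnd_eq lines (i+1) (by omega)
      set k := pvRunEnd lines lines.length (i+1) with hkdef
      have hki : k = i + 1 + pvRunLen (lines.drop (i+1)) := hk
      have hrl : pvRunLen (lines.drop i) = 1 + pvRunLen (lines.drop (i+1)) := by
        rw [hd]; simp [pvRunLen, ht]; omega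
      have hkle : i < k := by omega
      have hrec := pvLoopB_eq lines k
        (out ++ if 2 ≤ k - i then
            [PySem.Str.join "\n" (PySem.List.slice lines (some (i : Int)) (some (k : Int)))]
          else [])
        (by
          have hlen := pvRunLen_le (lines.drop i)
          simp only [List.length_drop] at hlen; omega)
      rw [hrec]
      have hslice : PySem.List.slice lines (some (i : Int)) (some (k : Int))
          = (lines.drop i).take (k - i) := PySem.List.slice_natCast lines i k
      have hdecomp := pvSplit_decomp (lines.drop i)
      have hdd : (lines.drop i).drop (pvRunLen (lines.drop i)) = lines.drop k := by
        rw [List.drop_drop]; congr 1; omega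
      have htailout : pvOut ((pvSplit (lines.drop k)).tail) = pvOut (pvSplit (lines.drop k)) := by
        apply pvOut_split_tail
        cases hcc : lines.drop k with
        | nil => exact Or.inl rfl
        | cons x r =>
          refine Or.inr ⟨x, r, rfl, ?_⟩
          exact pvDrop_runLen_head (lines.drop i) x r (by rw [hdd, hcc])
      rw [hdecomp, pvOut_cons, hdd, htailout]
      have hlenrun : ((lines.drop i).take (pvRunLen (lines.drop i))).length
          = pvRunLen (lines.drop i) := by
        rw [List.length_take]
        have hlen := pvRunLen_le (lines.drop i)
        omega
      have hkr : k - i = pvRunLen (lines.drop i) := by omega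
      rw [hslice, hkr, hlenrun, List.append_assoc]
    · rw [if_pos (by simp [ht])]
      rw [pvLoopB_eq lines (i+1) out (by omega), hd]
      simp [pvSplit, ht, pvOut_cons]
  · rw [if_neg h]
    have : lines.drop i = [] := List.drop_eq_nil_of_le (by omega)
    simp [this, pvSplit, pvOut]
termination_by lines.length - i
decreasing_by
  · have := pvRunEnd_ge lines lines.length (i+1); omega
  · omega

-- ===== VERDICT (by name: the statement is the Claim_ definition above) =====
theorem extract_tables_from_text_py_spec : Claim_equal_extract_tables_from_text_py := by
  intro text _
  unfold Spec_extract_tables_from_text_py extract_tables_from_text_py extract_tables_from_text_py_alt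
  have hA := pvLoopA_eq (((PySem.Str.split? text "\n").getD [])) [] []
  have hB := pvLoopB_eq (((PySem.Str.split? text "\n").getD []))
    0 [] (by omega)
  have h0 : (pvSplit (((PySem.Str.split? text "\n").getD []))).modifyHead
      (([] : List String) ++ ·) = pvSplit (((PySem.Str.split? text "\n").getD [])) := by
    cases pvSplit (((PySem.Str.split? text "\n").getD [])) <;> rfl
  rw [h0] at hA
  rw [hB]
  simpa using hA
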